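-- pv_equiv track=rewrite | github.com/MrBrantCode/unitest_baseline | mut_generate/mist_train_cf/cf_71607/solution.py | find_odd_occurrences
-- ===== SOURCE A (Python) =====
-- def find_odd_occurrences(arr):
--     result = {} # initialize an empty dictionary
--     for i, sub_arr in enumerate(arr):
--         counter = {} # initialize a counter dictionary
--         for j, num in enumerate(sub_arr):
--             counter[num] = counter.get(num, 0) + 1 # update the count of the number
--         for num, count in counter.items():
--             if count % 2 != 0:  # check if the count is odd.
--                 result[i] = sub_arr.index(num) # if yes, store the index of the sub-array and the index of the number
--                 break
--         else:
--             result[i] = -1 # if not, store -1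
--     return result
-- ===== SOURCE B (Python) =====
-- def find_odd_occurrences(arr):
--     result = {}
--     for i, sub_arr in enumerate(arr):
--         parity = set()  # values seen an odd number of times so far
--         for num in sub_arr:
--             if num in parity:
--                 parity.remove(num)
--             else:
--                 parity.add(num)
--         idx = -1
--         for j, num in enumerate(sub_arr):
--             if num in parity:
--                 idx = j
--                 break
--         result[i] = idx
--     return result
-- ===== Notes on version B (the rewrite author's own statement) =====
-- stated objective: alternative
-- what changed: Replaces the per-sub-array count dictionary plus a scan of counter.items() with .index() by a toggle-based parity set (add/remove on each occurrence) followed by a single enumerate scan that returns the first index whose value is in the parity set.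
import Mathlib
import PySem

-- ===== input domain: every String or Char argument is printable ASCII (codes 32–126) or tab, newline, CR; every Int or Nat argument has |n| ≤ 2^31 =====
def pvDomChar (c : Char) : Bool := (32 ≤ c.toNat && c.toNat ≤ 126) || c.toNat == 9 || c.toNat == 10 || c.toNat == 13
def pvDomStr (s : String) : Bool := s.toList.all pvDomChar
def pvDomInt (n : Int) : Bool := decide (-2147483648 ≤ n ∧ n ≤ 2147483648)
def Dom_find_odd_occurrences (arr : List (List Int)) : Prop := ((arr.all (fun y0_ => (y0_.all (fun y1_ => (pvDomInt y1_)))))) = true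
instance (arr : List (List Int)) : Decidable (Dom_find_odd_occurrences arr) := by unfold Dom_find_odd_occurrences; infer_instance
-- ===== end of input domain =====

-- B replaces A's per-sub-array count dictionary + items()-scan + .index() by a toggle-built
-- parity set and one enumerate scan for the first member (objective: alternative algorithm).

-- ===== PORT A =====
-- 'for num, count in counter.items(): if count % 2 != 0: … break / else: -1'
-- sub_arr.index(num): num is a counter key, hence always in sub_arr; index? is some there
-- (the .getD 0 default is never reached).
def pvAScan (sub : List Int) : List (Int × Int) → Int
  | [] => -1
  | (num, count) :: rest =>
      if PySem.Int.mod count 2 ≠ 0 then ((PySem.List.index? sub num).map (Int.ofNat)).getD 0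
      else pvAScan sub rest

def find_odd_occurrences (arr : List (List Int)) : List (Int × Int) :=
  ((PySem.List.enumerate arr 0).foldl
    (fun result p =>
      -- 'for j, num in enumerate(sub_arr): counter[num] = counter.get(num, 0) + 1' (j unused)
      let counter := p.2.foldl (fun d num => d.insert num (d.getD num 0 + 1)) PySem.Dict.empty
      result.insert p.1 (pvAScan p.2 counter.items))
    PySem.Dict.empty).items

-- ===== PORT B =====
-- 'if num in parity: parity.remove(num) else: parity.add(num)'
-- (remove? is some under the membership guard, so .getD parity is exact)
def pvToggle (parity : PySem.Set Int) (num : Int) : PySem.Set Int :=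
  if PySem.Set.contains parity num then (PySem.Set.remove? parity num).getD parity
  else PySem.Set.add parity num

-- 'for j, num in enumerate(sub_arr): if num in parity: idx = j; break'  (idx starts at -1)
def pvBScan (parity : PySem.Set Int) : List (Int × Int) → Int
  | [] => -1
  | (j, num) :: rest => if PySem.Set.contains parity num then j else pvBScan parity rest

def find_odd_occurrences_alt (arr : List (List Int)) : List (Int × Int) :=
  ((PySem.List.enumerate arr 0).foldl
    (fun result p =>
      let parity := p.2.foldl pvToggle PySem.Set.empty
      result.insert p.1 (pvBScan parity (PySem.List.enumerate p.2 0)))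
    PySem.Dict.empty).items

-- ===== PRECONDITION & SPEC =====
def Spec_find_odd_occurrences (arr : List (List Int)) (out : List (Int × Int)) : Prop := out = find_odd_occurrences_alt arr
instance (arr : List (List Int)) (out : List (Int × Int)) : Decidable (Spec_find_odd_occurrences arr out) := by unfold Spec_find_odd_occurrences; infer_instance

-- ===== CLAIM (what is proved, stated in full; the proofs are below) =====
def Claim_equal_find_odd_occurrences : Prop := ∀ (arr : List (List Int)), Dom_find_odd_occurrences arr → Spec_find_odd_occurrences arr (find_odd_occurrences arr)

-- ===== LEMMAS AND PROOFS =====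

theorem pvToggle_invariant (l : List Int) :
    ∀ (s : PySem.Set Int), s.Nodup →
      (l.foldl pvToggle s).Nodup ∧
      (∀ x : Int, x ∈ l.foldl pvToggle s ↔ ((x ∈ s) ↔ l.count x % 2 = 0)) := by
  induction l with
  | nil => intro s hs; simpa using hs
  | cons a t ih =>
    intro s hs
    have hstep_nodup : (pvToggle s a).Nodup := by
      unfold pvToggle
      split
      · rename_i h
        have hm : a ∈ s := by simpa [PySem.Set.contains_eq_decide] using h
        rw [PySem.Set.remove?_of_mem hm]
        exact List.Nodup.filter _ hs
      · exact PySem.Set.nodup_add _ _ hs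
    have hstep_mem : ∀ x : Int, x ∈ pvToggle s a ↔ ((x ∈ s) ↔ ¬ x = a) := by
      intro x
      unfold pvToggle
      split
      · rename_i h
        have hm : a ∈ s := by simpa [PySem.Set.contains_eq_decide] using h
        rw [PySem.Set.remove?_of_mem hm, Option.getD_some, PySem.Set.mem_discard]
        constructor
        · rintro ⟨h1, h2⟩; tauto
        · intro hiff
          by_cases hx : x = a
          · subst hx; exact absurd (hiff.mp hm) (not_not_intro rfl)
          · exact ⟨hiff.mpr hx, hx⟩
      · rename_i h
        have hm : a ∉ s := by simpa [PySem.Set.contains_eq_decide] using h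
        rw [PySem.Set.mem_add]
        by_cases hx : x = a
        · subst hx; tauto
        · tauto
    obtain ⟨hn, hmem⟩ := ih (pvToggle s a) hstep_nodup
    refine ⟨hn, fun x => ?_⟩
    rw [List.foldl_cons, hmem x, hstep_mem x]
    by_cases hx : x = a
    · subst hx
      by_cases hP : x ∈ s <;> by_cases he : List.count x t % 2 = 0 <;>
        simp [hP, he, List.count_cons_self] <;> omega
    · have hax : ¬ a = x := fun h => hx h.symm
      simp [hx, hax]
theorem pvOfList_pairwise_idxOf (sub : List Int) :
    (PySem.Set.ofList sub).Pairwise (fun u w => sub.idxOf u < sub.idxOf w) := by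
  induction sub with
  | nil => simp [PySem.Set.ofList]
  | cons a xs ih =>
    rw [PySem.Set.ofList_cons]
    constructor
    · intro w hw
      have hw' : w ∈ PySem.Set.ofList xs ∧ w ≠ a := by
        simpa [PySem.Set.mem_discard] using hw
      rw [List.idxOf_cons_self]
      rw [List.idxOf_cons_ne _ hw'.2.symm]  -- guess name/arg shape
      omega
    · have hsub : (PySem.Set.discard (PySem.Set.ofList xs) a).Sublist (PySem.Set.ofList xs) :=
        List.filter_sublist
      have hp := (ih.sublist hsub)
      refine hp.imp_of_mem ?_
      intro u w hu hw h
      have hu' : u ≠ a := by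
        have := (PySem.Set.mem_discard _ _ _).mp hu; exact this.2
      have hw' : w ≠ a := by
        have := (PySem.Set.mem_discard _ _ _).mp hw; exact this.2
      rw [List.idxOf_cons_ne _ hu'.symm, List.idxOf_cons_ne _ hw'.symm]
      omega
theorem pvFind?_of_pairwise {α : Type} [DecidableEq α] {r : α → α → Prop} {L : List α}
    {q : α → Bool} {v : α}
    (hp : L.Pairwise r) (hv : v ∈ L) (hqv : q v = true)
    (hmin : ∀ u ∈ L, q u = true → u ≠ v → r v u)
    (hasym : ∀ u, r u v → ¬ r v u) :
    L.find? q = some v := by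
  induction L with
  | nil => cases hv
  | cons a t ih =>
    by_cases ha : a = v
    · subst ha; simp [hqv]
    · rcases hp with _ | ⟨hhead, hp'⟩
      have hvt : v ∈ t := by
        rcases List.mem_cons.mp hv with h | h
        · exact absurd h.symm ha
        · exact h
      have hqa : q a = false := by
        by_contra hq
        have hq' : q a = true := by simpa using hq
        have h1 : r v a := hmin a (List.mem_cons_self) hq' ha
        have h2 : r a v := hhead v hvt
        exact hasym a h2 h1
      rw [List.find?_cons, hqa]
      exact ih hp' hvt (fun u hu hq hne => hmin u (List.mem_cons_of_mem a hu) hq hne)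

theorem pvAScan_map (sub : List Int) (q : Int → Bool)
    (L : List Int) (hq : ∀ k, q k = decide (sub.count k % 2 = 1)) :
    pvAScan sub (L.map (fun k => (k, (sub.count k : Int)))) =
      (match L.find? q with
       | some v => ((PySem.List.index? sub v).map (Int.ofNat)).getD 0
       | none => (-1 : Int)) := by
  induction L with
  | nil => simp [pvAScan]
  | cons k t ih =>
    simp only [List.map_cons, pvAScan, List.find?_cons]
    have hmod : PySem.Int.mod ((sub.count k : Nat) : Int) 2 = ((sub.count k % 2 : Nat) : Int) := by
      exact_mod_cast PySem.Int.mod_natCast (sub.count k) 2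
    by_cases hodd : sub.count k % 2 = 1
    · have : q k = true := by rw [hq k]; simpa using hodd
      rw [this, if_pos (by rw [hmod, hodd]; norm_num)]
    · have h0 : sub.count k % 2 = 0 := by omega
      have : q k = false := by rw [hq k]; simpa using hodd
      rw [this, if_neg (by rw [hmod, h0]; norm_num)]
      exact ih

theorem pvBScan_enumerate (parity : PySem.Set Int) (sub : List Int) :
    ∀ (s : Int), pvBScan parity (PySem.List.enumerate sub s) =
      (match sub.findIdx? (fun x => decide (x ∈ parity)) with
       | some j => s + (j : Int)
       | none => (-1 : Int)) := by
  induction sub with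
  | nil => intro s; simp [PySem.List.enumerate_nil, pvBScan]
  | cons a t ih =>
    intro s
    rw [PySem.List.enumerate_cons]
    simp only [pvBScan, List.findIdx?_cons]
    by_cases hm : a ∈ parity
    · simp [hm]
    · rw [PySem.Set.contains_eq_decide]
      simp only [hm, decide_false]
      rw [ih (s + 1)]
      cases hfi : t.findIdx? (fun x => decide (x ∈ parity)) with
      | none => simp
      | some j => simp; ring

theorem pvPerSub (sub : List Int) :
    pvAScan sub (sub.foldl (fun d num => d.insert num (d.getD num 0 + 1)) PySem.Dict.empty).items
      = pvBScan (sub.foldl pvToggle PySem.Set.empty) (PySem.List.enumerate sub 0) := by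
  obtain ⟨hnd, hmem⟩ := pvToggle_invariant sub PySem.Set.empty (by simp [PySem.Set.empty])
  set parity := sub.foldl pvToggle PySem.Set.empty with hpar
  have hmem' : ∀ x : Int, x ∈ parity ↔ sub.count x % 2 = 1 := by
    intro x
    rw [hmem x]
    have : (x ∈ (PySem.Set.empty : PySem.Set Int)) ↔ False := by simp [PySem.Set.empty]
    rw [this]
    constructor
    · intro h
      by_contra hc
      have h0 : sub.count x % 2 = 0 := by omega
      exact (h.mpr h0)
    · intro h
      constructor
      · intro hf; exact hf.elim
      · intro h0; omega
  set q : Int → Bool := fun x => decide (x ∈ parity) with hqdef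
  have hq : ∀ k, q k = decide (sub.count k % 2 = 1) := by
    intro k; simp only [hqdef]; exact decide_eq_decide.mpr (hmem' k)
  rw [PySem.Dict.foldl_insert_getD_add_one_eq_counter, PySem.Dict.items_counter,
      pvAScan_map sub q _ hq, pvBScan_enumerate parity sub 0]
  cases hfi : sub.findIdx? q with
  | none =>
    have hall : ∀ x ∈ sub, q x = false := List.findIdx?_eq_none_iff.mp hfi
    have hnone : (PySem.Set.ofList sub).find? q = none := by
      rw [List.find?_eq_none]
      intro x hx
      simp [hall x ((PySem.Set.mem_ofList _ _).mp hx)]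
    simp [hnone]
  | some j =>
    obtain ⟨hjlen, hjfind⟩ := List.findIdx?_eq_some_iff_findIdx_eq.mp hfi
    have hqj : q sub[j] = true := by
      subst hjfind; exact List.findIdx_getElem
    have hlt : ∀ i, i < j → ∀ (hl : i < sub.length), q sub[i] = false := by
      intro i hi hl
      exact List.not_of_lt_findIdx (hjfind ▸ hi)
    have hvmem : sub[j] ∈ sub := List.getElem_mem hjlen
    have hjv : sub.idxOf sub[j] = j := by
      have hvlen := List.idxOf_lt_length_of_mem hvmem
      have hvget := List.getElem_idxOf hvlen
      rcases Nat.lt_trichotomy (sub.idxOf sub[j]) j with h | h | h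
      · have := hlt _ h hvlen
        rw [hvget] at this
        rw [this] at hqj; cases hqj
      · exact h
      · exfalso
        have := List.not_of_lt_findIdx (p := (· == sub[j])) (xs := sub) (i := j) h
        simp at this
        exact this rfl
    have hfind : (PySem.Set.ofList sub).find? q = some sub[j] := by
      refine pvFind?_of_pairwise (pvOfList_pairwise_idxOf sub)
        ((PySem.Set.mem_ofList _ _).mpr hvmem) hqj ?_ (by intro u h1 h2; omega)
      intro u hu hqu hne
      have humem : u ∈ sub := (PySem.Set.mem_ofList _ _).mp hu
      have hiu_lt := List.idxOf_lt_length_of_mem humem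
      have hiu_get := List.getElem_idxOf hiu_lt
      have h1 : ¬ sub.idxOf u < j := by
        intro h
        have := hlt _ h hiu_lt
        rw [hiu_get] at this
        rw [this] at hqu; cases hqu
      have h2 : sub.idxOf u ≠ j := by
        intro h
        apply hne
        rw [← hiu_get]
        congr 1
      rw [hjv]; omega
    have hidx : PySem.List.index? sub sub[j] = some j := by
      rw [PySem.List.index?_eq_idxOf?]
      rw [List.idxOf?_eq_some_iff]
      refine ⟨hjlen, rfl, ?_⟩
      intro i hi
      have := hlt _ hi (Nat.lt_trans hi hjlen)
      intro hc
      rw [hc] at this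
      rw [this] at hqj; cases hqj
    have hidx' : List.idxOf? sub[j] sub = some j := by
      rw [← PySem.List.index?_eq_idxOf?]; exact hidx
    simp [hfind, hidx']

-- ===== VERDICT (by name: the statement is the Claim_ definition above) =====
theorem find_odd_occurrences_spec : Claim_equal_find_odd_occurrences := by
  intro arr _
  unfold Spec_find_odd_occurrences find_odd_occurrences find_odd_occurrences_alt
  rw [PySem.List.foldl_congr_mem (g := fun result (p : Int × List Int) =>
    result.insert p.1 (pvBScan (p.2.foldl pvToggle PySem.Set.empty) (PySem.List.enumerate p.2 0)))]
  intro acc p _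
  simp only [pvPerSub p.2]
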